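-- pv_equiv track=rewrite | github.com/FalkumSum/BookLogger | app.py | _extract_isbns
-- ===== SOURCE A (Python) =====
-- from typing import List, Optional
--
-- def validate_isbn13(isbn13: str) -> bool:
--     if not (isbn13.isdigit() and len(isbn13) == 13):
--         return False
--     total = sum((int(d) * (1 if i % 2 == 0 else 3)) for i, d in enumerate(isbn13[:12]))
--     check = (10 - (total % 10)) % 10
--     return check == int(isbn13[-1])
--
-- def isbn13_to_isbn10(isbn13: str) -> Optional[str]:
--     if not (isbn13.startswith("978") and validate_isbn13(isbn13)):
--         return None
--     core = isbn13[3:12]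
--     total = sum((i + 1) * int(d) for i, d in enumerate(core))
--     remainder = total % 11
--     check = "X" if remainder == 10 else str(remainder)
--     return core + check
--
-- def _extract_isbns(info: dict) -> tuple[str, str]:
--     isbn13, isbn10 = "", ""
--     for ident in info.get("industryIdentifiers", []) or []:
--         t = ident.get("type")
--         v = (ident.get("identifier") or "").strip()
--         if t == "ISBN_13" and not isbn13:
--             isbn13 = v
--         if t == "ISBN_10" and not isbn10:
--             isbn10 = v
--     if not isbn10 and isbn13 and isbn13.startswith("978") and validate_isbn13(isbn13):
--         maybe10 = isbn13_to_isbn10(isbn13)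
--         if maybe10:
--             isbn10 = maybe10
--     return isbn13, isbn10
-- ===== SOURCE B (Python) =====
-- from typing import Optional
--
-- def validate_isbn13(isbn13: str) -> bool:
--     if not (isbn13.isdigit() and len(isbn13) == 13):
--         return False
--     total = sum((int(d) * (1 if i % 2 == 0 else 3)) for i, d in enumerate(isbn13[:12]))
--     check = (10 - (total % 10)) % 10
--     return check == int(isbn13[-1])
--
-- def isbn13_to_isbn10(isbn13: str) -> Optional[str]:
--     if not (isbn13.startswith("978") and validate_isbn13(isbn13)):
--         return None
--     core = isbn13[3:12]
--     total = sum((i + 1) * int(d) for i, d in enumerate(core))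
--     remainder = total % 11
--     check = "X" if remainder == 10 else str(remainder)
--     return core + check
--
-- def _first_ident(idents, t: str) -> str:
--     for ident in idents:
--         if ident.get("type") == t:
--             v = (ident.get("identifier") or "").strip()
--             if v:
--                 return v
--     return ""
--
-- def _extract_isbns(info: dict) -> tuple[str, str]:
--     idents = info.get("industryIdentifiers") or []
--     isbn13 = _first_ident(idents, "ISBN_13")
--     isbn10 = _first_ident(idents, "ISBN_10")
--     if not isbn10:
--         isbn10 = isbn13_to_isbn10(isbn13) or ""
--     return isbn13, isbn10
-- ===== Notes on version B (the rewrite author's own statement) =====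
-- stated objective: idiomatic
-- what changed: The single interleaved loop with two mutable accumulators is replaced by a helper that scans once per identifier type (first non-empty stripped match, early return), called twice, and the redundant pre-validation before isbn13_to_isbn10 (which re-validates internally) is dropped in favour of 'isbn13_to_isbn10(isbn13) or ""'.
import Mathlib
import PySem

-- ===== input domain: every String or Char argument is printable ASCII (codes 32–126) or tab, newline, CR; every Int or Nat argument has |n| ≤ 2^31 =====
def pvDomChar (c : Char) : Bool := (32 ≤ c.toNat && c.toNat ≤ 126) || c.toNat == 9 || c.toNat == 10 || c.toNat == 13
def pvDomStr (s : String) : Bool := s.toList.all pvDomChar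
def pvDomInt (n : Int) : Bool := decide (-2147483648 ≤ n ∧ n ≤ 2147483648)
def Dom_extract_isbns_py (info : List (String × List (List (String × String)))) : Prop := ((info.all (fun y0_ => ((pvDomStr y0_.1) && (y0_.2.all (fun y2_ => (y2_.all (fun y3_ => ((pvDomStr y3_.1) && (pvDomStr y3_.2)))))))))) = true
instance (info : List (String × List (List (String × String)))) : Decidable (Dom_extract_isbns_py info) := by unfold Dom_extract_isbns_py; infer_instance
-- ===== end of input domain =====

-- B replaces A's single interleaved accumulator loop by a first-match-per-type helper called
-- twice, and drops the pre-validation that isbn13_to_isbn10 repeats internally (idiomatic; same cost).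

-- ===== PORT A =====

-- int(d) for a single digit character (every use below is guarded by isdigit / validate)
def digitInt (c : Char) : Int := (c.toNat : Int) - 48

-- shared module helper validate_isbn13 (identical in Source A and Source B)
def validate_isbn13_py (s : String) : Bool :=
  if ¬(PySem.Str.strIsdigit s ∧ PySem.Str.len s = 13) then false
  else
    let total := (PySem.List.enumerate (PySem.Str.slice s none (some 12)).toList 0).foldl
      (fun acc p => acc + digitInt p.2 * (if PySem.Int.mod p.1 2 = 0 then 1 else 3)) 0
    let check := PySem.Int.mod (10 - PySem.Int.mod total 10) 10
    -- s[-1] is in range here since len s = 13 (the guard above), so getD is never taken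
    check = digitInt ((PySem.Str.pyGet? s (-1)).getD '0')

-- shared module helper isbn13_to_isbn10 (identical in Source A and Source B)
def isbn13_to_isbn10_py (s : String) : Option String :=
  if ¬(PySem.Str.startswith s "978" ∧ validate_isbn13_py s = true) then none
  else
    let core := PySem.Str.slice s (some 3) (some 12)
    let total := (PySem.List.enumerate core.toList 0).foldl
      (fun acc p => acc + (p.1 + 1) * digitInt p.2) 0
    let remainder := PySem.Int.mod total 11
    let check := if remainder = 10 then "X" else PySem.Int.toStr remainder
    some (core ++ check)

def extract_isbns_py (info : List (String × List (List (String × String)))) : String × String :=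
  let idents0 := (PySem.Dict.mk info).getD "industryIdentifiers" []
  -- `or []` : on a (typed) list value this re-yields [] for an empty list
  let idents := if idents0.isEmpty then [] else idents0
  let p := idents.foldl (fun (st : String × String) ident =>
    let t := (PySem.Dict.mk ident).get? "type"
    -- (ident.get("identifier") or "") : None → "", "" stays ""
    let v := PySem.Str.strip (((PySem.Dict.mk ident).get? "identifier").getD "")
    let s13 := if t = some "ISBN_13" ∧ st.1 = "" then v else st.1
    let s10 := if t = some "ISBN_10" ∧ st.2 = "" then v else st.2
    (s13, s10)) ("", "")
  let isbn13 := p.1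
  let isbn10 := p.2
  let isbn10' :=
    if isbn10 = "" ∧ isbn13 ≠ "" ∧ PySem.Str.startswith isbn13 "978" ∧ validate_isbn13_py isbn13 = true then
      match isbn13_to_isbn10_py isbn13 with
      | some m => if m ≠ "" then m else isbn10
      | none => isbn10
    else isbn10
  (isbn13, isbn10')

-- ===== PORT B =====

-- Source B's _first_ident: first identifier entry of the given type with a non-empty stripped value
def firstIdent (idents : List (List (String × String))) (t : String) : String :=
  match idents with
  | [] => ""
  | ident :: rest =>
    if (PySem.Dict.mk ident).get? "type" = some t then
      let v := PySem.Str.strip (((PySem.Dict.mk ident).get? "identifier").getD "")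
      if v ≠ "" then v else firstIdent rest t
    else firstIdent rest t

def extract_isbns_py_alt (info : List (String × List (List (String × String)))) : String × String :=
  -- info.get("industryIdentifiers") or [] : None → [] (a present value is already a list)
  let idents := (PySem.Dict.mk info).getD "industryIdentifiers" []
  let isbn13 := firstIdent idents "ISBN_13"
  let isbn10 := firstIdent idents "ISBN_10"
  (isbn13, if isbn10 = "" then (isbn13_to_isbn10_py isbn13).getD "" else isbn10)

-- ===== PRECONDITION & SPEC =====
def Spec_extract_isbns_py (info : List (String × List (List (String × String)))) (out : String × String) : Prop := out = extract_isbns_py_alt info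
instance (info : List (String × List (List (String × String)))) (out : String × String) : Decidable (Spec_extract_isbns_py info out) := by unfold Spec_extract_isbns_py; infer_instance

-- ===== CLAIM (what is proved, stated in full; the proofs are below) =====
def Claim_equal_extract_isbns_py : Prop := ∀ (info : List (String × List (List (String × String)))), Dom_extract_isbns_py info → Spec_extract_isbns_py info (extract_isbns_py info)

-- ===== LEMMAS AND PROOFS =====

-- one step of one component of A's loop against one step of B's scan
theorem comp_eq (t : Option String) (v f a : String) (TT : String) :
    (if (if t = some TT ∧ a = "" then v else a) = "" then f
     else (if t = some TT ∧ a = "" then v else a))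
    = (if a = "" then (if t = some TT then (if v ≠ "" then v else f) else f) else a) := by
  by_cases ha : a = ""
  · subst ha
    by_cases ht : t = some TT
    · by_cases hv : v = "" <;> simp [ht, hv]
    · simp [ht]
  · simp [ha]

theorem firstIdent_cons (ident : List (String × String))
    (rest : List (List (String × String))) (t : String) :
    firstIdent (ident :: rest) t
    = (if (PySem.Dict.mk ident).get? "type" = some t then
        (if PySem.Str.strip (((PySem.Dict.mk ident).get? "identifier").getD "") ≠ "" then
          PySem.Str.strip (((PySem.Dict.mk ident).get? "identifier").getD "")
        else firstIdent rest t)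
      else firstIdent rest t) := rfl

-- A's loop, with arbitrary starting accumulators, computes B's two first-match scans
theorem loop_eq (l : List (List (String × String))) (a b : String) :
    l.foldl (fun (st : String × String) ident =>
      let t := (PySem.Dict.mk ident).get? "type"
      let v := PySem.Str.strip (((PySem.Dict.mk ident).get? "identifier").getD "")
      let s13 := if t = some "ISBN_13" ∧ st.1 = "" then v else st.1
      let s10 := if t = some "ISBN_10" ∧ st.2 = "" then v else st.2
      (s13, s10)) (a, b)
    = ((if a = "" then firstIdent l "ISBN_13" else a),
       (if b = "" then firstIdent l "ISBN_10" else b)) := by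
  induction l generalizing a b with
  | nil => simp [firstIdent]
  | cons ident rest ih =>
    simp only [List.foldl_cons]
    rw [ih, firstIdent_cons, firstIdent_cons]
    exact Prod.ext (comp_eq _ _ _ _ _) (comp_eq _ _ _ _ _)

theorem conv_none (s : String)
    (h : ¬(PySem.Str.startswith s "978" = true ∧ validate_isbn13_py s = true)) :
    isbn13_to_isbn10_py s = none := by
  unfold isbn13_to_isbn10_py
  rw [if_pos h]

-- A's guarded fallback equals B's `isbn13_to_isbn10(isbn13) or ""`
theorem final_eq (i13 i10 : String) :
    (if i10 = "" ∧ ¬i13 = "" ∧ PySem.Str.startswith i13 "978" = true ∧ validate_isbn13_py i13 = true then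
      match isbn13_to_isbn10_py i13 with
      | some m => if ¬m = "" then m else i10
      | none => i10
    else i10)
    = (if i10 = "" then (isbn13_to_isbn10_py i13).getD "" else i10) := by
  by_cases hb : i10 = ""
  · subst hb
    by_cases hz : i13 = ""
    · subst hz
      rw [conv_none "" (by decide)]
      simp
    · by_cases hc : PySem.Str.startswith i13 "978" = true ∧ validate_isbn13_py i13 = true
      · rw [if_pos ⟨rfl, hz, hc.1, hc.2⟩]
        unfold isbn13_to_isbn10_py
        rw [if_neg (by simpa using hc)]
        simp only [Option.getD_some]
        split <;> simp_all
      · rw [conv_none i13 hc]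
        rw [if_neg (by intro h; exact hc ⟨h.2.2.1, h.2.2.2⟩)]
        simp
  · simp [hb]

-- ===== VERDICT (by name: the statement is the Claim_ definition above) =====
theorem extract_isbns_py_spec : Claim_equal_extract_isbns_py := by
  intro info _
  show extract_isbns_py info = extract_isbns_py_alt info
  unfold extract_isbns_py extract_isbns_py_alt
  have hid : ∀ (l : List (List (String × String))), (if l.isEmpty then [] else l) = l := by
    intro l; split <;> simp_all [List.isEmpty_iff]
  simp only [hid, loop_eq, reduceIte, ne_eq]
  rw [final_eq]
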